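-- pv_equiv track=rewrite | github.com/Andrey-Figueroa/Python-2024 | LaboratorioRecursividad.py | formarNumeroAux
-- ===== SOURCE A (Python) =====
-- def formarNumeroAux(pNum, acumulador, factor):
--     pNum = abs(pNum)
--     if pNum == 0:
--         return acumulador
--     if (pNum % 10) % 2 == 0:
--         return formarNumeroAux(pNum // 10, acumulador + (pNum % 10) * factor, factor * 10)
--     else:
--         return formarNumeroAux(pNum // 10, acumulador, factor)
-- ===== SOURCE B (Python) =====
-- def formarNumeroAux(pNum, acumulador, factor):
--     # Two-phase iterative version: extract digits least-significant first, then fold.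
--     pNum = abs(pNum)
--     digits = []
--     while pNum != 0:
--         digits.append(pNum % 10)
--         pNum //= 10
--     for d in digits:
--         if d % 2 == 0:
--             acumulador += d * factor
--             factor *= 10
--     return acumulador
-- ===== Notes on version B (the rewrite author's own statement) =====
-- stated objective: alternative
-- what changed: Replaced the three-way recursion threading accumulator and factor through calls with an iterative two-phase version: one loop extracts the digits into a list, then a fold over that list updates the accumulator/factor locals.
import Mathlib
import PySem

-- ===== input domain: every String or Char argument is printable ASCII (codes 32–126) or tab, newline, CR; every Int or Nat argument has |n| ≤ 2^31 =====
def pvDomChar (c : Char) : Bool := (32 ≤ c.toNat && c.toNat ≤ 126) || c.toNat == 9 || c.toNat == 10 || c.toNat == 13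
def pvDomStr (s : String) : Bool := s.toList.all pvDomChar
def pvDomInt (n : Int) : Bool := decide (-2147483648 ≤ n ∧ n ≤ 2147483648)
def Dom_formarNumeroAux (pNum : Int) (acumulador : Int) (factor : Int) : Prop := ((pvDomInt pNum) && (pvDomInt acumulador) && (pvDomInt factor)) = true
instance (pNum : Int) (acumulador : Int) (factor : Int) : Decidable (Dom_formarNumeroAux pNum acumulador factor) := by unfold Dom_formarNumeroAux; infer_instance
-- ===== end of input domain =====

-- B replaces A's accumulator-threading recursion with a two-phase iterative version
-- (collect digits, then fold); same values everywhere (objective: alternative).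


-- ===== PORT A =====
-- literal transliteration of A's recursion (pNum = abs(pNum) first; '//' '%' via PySem on a nonneg dividend)
def formarNumeroAux (pNum : Int) (acumulador : Int) (factor : Int) : Int :=
  if h : |pNum| = 0 then acumulador
  else if PySem.Int.mod (|pNum|) 10 % 2 = 0 then
    formarNumeroAux (PySem.Int.floordiv (|pNum|) 10) (acumulador + PySem.Int.mod (|pNum|) 10 * factor) (factor * 10)
  else
    formarNumeroAux (PySem.Int.floordiv (|pNum|) 10) acumulador factor
termination_by pNum.natAbs
decreasing_by
  all_goals
    rw [PySem.Int.floordiv_eq_ediv_of_pos (by norm_num)]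
    simp only [Int.abs_eq_natAbs] at *
    omega

-- ===== PORT B =====
-- phase 1 of Source B: the digit-extraction loop (abs(pNum) is nonneg, so the loop state is a Nat)
def pvDigitsB (n : Nat) : List Int :=
  if n = 0 then [] else ((n % 10 : Nat) : Int) :: pvDigitsB (n / 10)

-- phase 2 of Source B: the for-loop over the digit list, updating (acumulador, factor)
def pvStepB (st : Int × Int) (d : Int) : Int × Int :=
  if d % 2 = 0 then (st.1 + d * st.2, st.2 * 10) else st

def formarNumeroAux_alt (pNum : Int) (acumulador : Int) (factor : Int) : Int :=
  ((pvDigitsB pNum.natAbs).foldl pvStepB (acumulador, factor)).1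

-- ===== PRECONDITION & SPEC =====
def Spec_formarNumeroAux (pNum : Int) (acumulador : Int) (factor : Int) (out : Int) : Prop := out = formarNumeroAux_alt pNum acumulador factor
instance (pNum : Int) (acumulador : Int) (factor : Int) (out : Int) : Decidable (Spec_formarNumeroAux pNum acumulador factor out) := by unfold Spec_formarNumeroAux; infer_instance

-- ===== CLAIM (what is proved, stated in full; the proofs are below) =====
def Claim_equal_formarNumeroAux : Prop := ∀ (pNum : Int) (acumulador : Int) (factor : Int), Dom_formarNumeroAux pNum acumulador factor → Spec_formarNumeroAux pNum acumulador factor (formarNumeroAux pNum acumulador factor)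

-- ===== LEMMAS AND PROOFS =====
theorem formarNumeroAux_eq_fold (n : Nat) : ∀ (ac f : Int),
    formarNumeroAux (n : Int) ac f = ((pvDigitsB n).foldl pvStepB (ac, f)).1 := by
  induction n using Nat.strong_induction_on with
  | _ n ih =>
    intro ac f
    rw [formarNumeroAux, pvDigitsB]
    have habs : |(n : Int)| = (n : Int) := abs_of_nonneg (by positivity)
    by_cases h0 : n = 0
    · simp [h0]
    · have hn : ¬ (|(n : Int)| = 0) := by simpa [habs] using fun h => h0 (by exact_mod_cast h)
      have hmod : PySem.Int.mod (|(n : Int)|) 10 = ((n % 10 : Nat) : Int) := by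
        rw [habs]; exact_mod_cast PySem.Int.mod_natCast n 10
      have hdiv : PySem.Int.floordiv (|(n : Int)|) 10 = ((n / 10 : Nat) : Int) := by
        rw [habs]; exact_mod_cast PySem.Int.floordiv_natCast n 10
      have hlt : n / 10 < n := Nat.div_lt_self (Nat.pos_of_ne_zero h0) (by norm_num)
      rw [if_neg h0]
      simp only [dif_neg hn, hmod, hdiv, List.foldl_cons, pvStepB]
      by_cases hp : ((n % 10 : Nat) : Int) % 2 = 0
      · rw [if_pos hp, if_pos hp]; exact ih _ hlt _ _
      · rw [if_neg hp, if_neg hp]; exact ih _ hlt _ _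

-- ===== VERDICT (by name: the statement is the Claim_ definition above) =====
theorem formarNumeroAux_spec : Claim_equal_formarNumeroAux := by
  intro pNum ac f _
  unfold Spec_formarNumeroAux formarNumeroAux_alt
  have h : formarNumeroAux pNum ac f = formarNumeroAux (pNum.natAbs : Int) ac f := by
    conv_lhs => rw [formarNumeroAux]
    conv_rhs => rw [formarNumeroAux]
    simp only [Int.abs_eq_natAbs, Int.natAbs_natCast]
  rw [h, formarNumeroAux_eq_fold]
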